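-- pv_equiv track=rewrite | github.com/GREENRAT-K405/SEM4_AI | LAB-7/Q1.py | get_nxt
-- ===== SOURCE A (Python) =====
-- def calc(arr):
--     h = 0
--     for i in range(8):
--         for j in range(i + 1, 8):
--             if arr[i] == arr[j]:        #for same row
--                 h = h + 1
--             elif abs(arr[i] - arr[j]) == abs(i - j):      #for same diagonal
--                 h = h + 1
--     return h
--
-- def get_nxt(b): #input is state of the board configuration
--     min_h = calc(b)     # minimum heuristic
--     best = list(b)      # best board state
--
--     for i in range(8):  #each queen
--         for j in range(8):  #movement in row
--             if b[i] != j: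
--                 temp = list(b)
--                 temp[i] = j
--                 th = calc(temp)     #total heuristic
--                 if th < min_h:
--                     min_h = th
--                     best = list(temp)
--     return best, min_h
-- ===== SOURCE B (Python) =====
-- def _pairs(zs):
--     # number of unordered pairs of equal entries: sum over buckets of C(c, 2)
--     d = {}
--     for v in zs:
--         d[v] = d.get(v, 0) + 1
--     t = 0
--     for c in d.values():
--         t += c * (c - 1) // 2
--     return t
--
-- def _h(arr):
--     # attacking pairs = equal-row pairs + equal-diagonal pairs + equal-anti-diagonal pairs
--     rows = []
--     diag = []
--     anti = []
--     for k in range(8):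
--         v = arr[k]
--         rows.append(v)
--         diag.append(k - v)
--         anti.append(k + v)
--     return _pairs(rows) + _pairs(diag) + _pairs(anti)
--
-- def get_nxt(b):
--     min_h = _h(b)
--     best = list(b)
--     for i in range(8):
--         for j in range(8):
--             if b[i] != j:
--                 temp = list(b)
--                 temp[i] = j
--                 th = _h(temp)
--                 if th < min_h:
--                     min_h = th
--                     best = list(temp)
--     return best, min_h
-- ===== Notes on version B (the rewrite author's own statement) =====
-- stated objective: alternative
-- what changed: The O(pairs) elif-chain conflict heuristic is replaced by a grouped count: bucket the 8 queens by row value, by diagonal index k-arr[k] and by anti-diagonal index k+arr[k], and sum c*(c-1)//2 over the buckets; the outer best-neighbor search is unchanged.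
import Mathlib
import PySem

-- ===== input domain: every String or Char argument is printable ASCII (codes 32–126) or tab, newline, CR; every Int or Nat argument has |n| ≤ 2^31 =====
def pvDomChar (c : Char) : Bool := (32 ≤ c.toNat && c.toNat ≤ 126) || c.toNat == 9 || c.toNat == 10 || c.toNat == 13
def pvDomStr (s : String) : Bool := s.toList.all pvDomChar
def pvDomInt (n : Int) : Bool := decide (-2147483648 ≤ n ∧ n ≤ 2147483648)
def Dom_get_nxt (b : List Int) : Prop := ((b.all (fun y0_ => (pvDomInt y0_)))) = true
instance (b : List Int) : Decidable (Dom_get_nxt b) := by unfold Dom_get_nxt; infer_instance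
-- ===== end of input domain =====

-- B replaces the pairwise elif-chain conflict heuristic by a grouped count: bucket the queens by
-- row, diagonal (k - arr[k]) and anti-diagonal (k + arr[k]) and sum c*(c-1)//2 per bucket (objective: alternative).

-- ===== PORT A =====
-- Python abs on ints, exact
def pyabs (x : Int) : Int := if x < 0 then -x else x

-- arr[i]/arr[j]: indices 0..7 are in range for every list calc is applied to under Pre_ (length ≥ 8),
-- so pyGetD's default is unreachable there
def pvCalc (arr : List Int) : Int :=
  (PySem.List.pyRange 0 8 1).foldl (fun h i =>
    (PySem.List.pyRange (i + 1) 8 1).foldl (fun h j =>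
      if PySem.List.pyGetD arr i 0 = PySem.List.pyGetD arr j 0 then h + 1
      else if pyabs (PySem.List.pyGetD arr i 0 - PySem.List.pyGetD arr j 0) = pyabs (i - j) then h + 1
      else h) h) 0

def get_nxt (b : List Int) : List Int × Int :=
  (PySem.List.pyRange 0 8 1).foldl (fun st i =>
    (PySem.List.pyRange 0 8 1).foldl (fun st j =>
      if PySem.List.pyGetD b i 0 ≠ j then
        let temp := PySem.List.pySetD b i j
        let th := pvCalc temp
        if th < st.2 then (temp, th) else st
      else st) st) (b, pvCalc b)

-- ===== PORT B =====
def pvPairs (zs : List Int) : Int :=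
  let d := zs.foldl (fun (d : PySem.Dict Int Int) v => d.insert v (d.getD v 0 + 1)) PySem.Dict.empty
  d.values.foldl (fun t c => t + PySem.Int.floordiv (c * (c - 1)) 2) 0

def pvHeur (arr : List Int) : Int :=
  let t := (PySem.List.pyRange 0 8 1).foldl
    (fun (t : List Int × List Int × List Int) k =>
      let v := PySem.List.pyGetD arr k 0
      (t.1 ++ [v], t.2.1 ++ [k - v], t.2.2 ++ [k + v])) ([], [], [])
  pvPairs t.1 + pvPairs t.2.1 + pvPairs t.2.2

def get_nxt_alt (b : List Int) : List Int × Int :=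
  (PySem.List.pyRange 0 8 1).foldl (fun st i =>
    (PySem.List.pyRange 0 8 1).foldl (fun st j =>
      if PySem.List.pyGetD b i 0 ≠ j then
        let temp := PySem.List.pySetD b i j
        let th := pvHeur temp
        if th < st.2 then (temp, th) else st
      else st) st) (b, pvHeur b)

-- ===== PRECONDITION & SPEC =====
-- Python A evaluates b[i] for i in range(8): it raises IndexError iff len(b) < 8
def Pre_get_nxt (b : List Int) : Prop := 8 ≤ b.length
instance (b : List Int) : Decidable (Pre_get_nxt b) := by unfold Pre_get_nxt; infer_instance
def pvWitness_get_nxt : List Int := [0, 0, 0, 0, 0, 0, 0, 0]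

def Spec_get_nxt (b : List Int) (out : List Int × Int) : Prop := out = get_nxt_alt b
instance (b : List Int) (out : List Int × Int) : Decidable (Spec_get_nxt b out) := by unfold Spec_get_nxt; infer_instance

-- ===== CLAIM (what is proved, stated in full; the proofs are below) =====
def Claim_equal_get_nxt : Prop := ∀ (b : List Int), Dom_get_nxt b → Pre_get_nxt b → Spec_get_nxt b (get_nxt b)

-- ===== LEMMAS AND PROOFS =====

-- indicator of equality; the common atom both flattened heuristics are summed from
def eqInd (a b : Int) : Int := if a = b then 1 else 0

-- number of unordered pairs of equal entries, recursing on the head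
def eqP : List Int → Int
  | [] => 0
  | x :: xs => (xs.count x : Int) + eqP xs

lemma eqP_append (zs : List Int) (v : Int) :
    eqP (zs ++ [v]) = eqP zs + (zs.count v : Int) := by
  induction zs with
  | nil => simp [eqP]
  | cons x zs ih =>
    simp only [List.cons_append, eqP, ih, List.count_append, List.count_cons,
      List.count_nil, beq_iff_eq]
    by_cases h : v = x
    · subst h; simp; ring
    · have h' : ¬ (x = v) := fun hh => h hh.symm
      simp [h, h']
      ring

lemma fdC (c : Nat) :
    PySem.Int.floordiv ((c : Int) * ((c : Int) - 1)) 2 = ((c.choose 2 : Nat) : Int) := by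
  cases c with
  | zero => decide
  | succ k =>
    have h1 : ((k + 1 : Nat) : Int) * (((k + 1 : Nat) : Int) - 1) = (((k + 1) * k : Nat) : Int) := by
      push_cast; ring
    rw [h1]
    have h2 : PySem.Int.floordiv ((((k + 1) * k : Nat)) : Int) ((2 : Nat) : Int)
        = (((k + 1) * k / 2 : Nat) : Int) := PySem.Int.floordiv_natCast _ _
    have h3 : ((2 : Nat) : Int) = (2 : Int) := by norm_num
    rw [← h3, h2]
    congr 1
    rw [Nat.choose_two_right]
    simp

lemma sumC (zs : List Int) :
    ((PySem.Set.ofList zs).map (fun v => ((zs.count v).choose 2 : Int))).sum = eqP zs := by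
  induction zs using List.reverseRecOn with
  | nil => simp [eqP]
  | append_singleton zs v ih =>
    have hof : PySem.Set.ofList (zs ++ [v]) = PySem.Set.add (PySem.Set.ofList zs) v := by
      rw [PySem.Set.ofList_eq_foldl, PySem.Set.ofList_eq_foldl, List.foldl_append]
      rfl
    rw [eqP_append, hof]
    by_cases hv : v ∈ zs
    · have hmem : v ∈ PySem.Set.ofList zs := by
        rw [← PySem.List.dedup_eq_ofList]; exact (PySem.List.mem_dedup _ _).mpr hv
      have hadd : PySem.Set.add (PySem.Set.ofList zs) v = PySem.Set.ofList zs := by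
        simp [PySem.Set.add, PySem.Set.contains, hmem]
      rw [hadd]
      have hnd : (PySem.Set.ofList zs).Nodup := by
        rw [← PySem.List.dedup_eq_ofList]; exact PySem.List.nodup_dedup zs
      have hperm : (PySem.Set.ofList zs).Perm (v :: (PySem.Set.ofList zs).erase v) :=
        List.perm_cons_erase hmem
      have h1 := ((hperm.map (fun w => (((zs ++ [v]).count w).choose 2 : Int)))).sum_eq
      have h2 := ((hperm.map (fun w => ((zs.count w).choose 2 : Int)))).sum_eq
      rw [h1]
      rw [h2] at ih
      simp only [List.map_cons, List.sum_cons] at *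
      have hcv : (zs ++ [v]).count v = zs.count v + 1 := by simp
      have hrest : ((PySem.Set.ofList zs).erase v).map (fun w => (((zs ++ [v]).count w).choose 2 : Int))
          = ((PySem.Set.ofList zs).erase v).map (fun w => ((zs.count w).choose 2 : Int)) := by
        apply List.map_congr_left
        intro w hw
        have hne : w ≠ v := ((hnd.mem_erase_iff).mp hw).1
        simp [List.count_append, hne.symm]
      rw [hrest, hcv, ← ih]
      have : (zs.count v + 1).choose 2 = zs.count v + (zs.count v).choose 2 := by
        rw [Nat.choose_succ_succ]
        simp [Nat.choose_one_right]
      rw [this]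
      push_cast
      ring
    · have hmem : v ∉ PySem.Set.ofList zs := by
        rw [← PySem.List.dedup_eq_ofList]; exact fun h => hv ((PySem.List.mem_dedup _ _).mp h)
      have hadd : PySem.Set.add (PySem.Set.ofList zs) v = PySem.Set.ofList zs ++ [v] := by
        simp [PySem.Set.add, PySem.Set.contains, hmem]
      rw [hadd, List.map_append, List.sum_append]
      have hrest : (PySem.Set.ofList zs).map (fun w => (((zs ++ [v]).count w).choose 2 : Int))
          = (PySem.Set.ofList zs).map (fun w => ((zs.count w).choose 2 : Int)) := by
        apply List.map_congr_left
        intro w hw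
        have hne : w ≠ v := fun h => hmem (h ▸ hw)
        simp [List.count_append, hne.symm]
      rw [hrest, ← ih]
      have hc0 : zs.count v = 0 := List.count_eq_zero_of_not_mem hv
      simp [List.count_append, hc0]

lemma pvPairs_eq (zs : List Int) : pvPairs zs = eqP zs := by
  unfold pvPairs
  rw [PySem.Dict.foldl_insert_getD_add_one_eq_counter]
  rw [PySem.List.foldl_add (g := fun c => PySem.Int.floordiv (c * (c - 1)) 2)]
  simp only [PySem.Dict.values, PySem.Dict.items_counter, List.map_map, Function.comp_def]
  simp only [fdC]
  rw [zero_add, sumC]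

lemma pairlem (i j : Int) (h : i < j) (a b : Int) :
    (if a = b then (1 : Int) else if pyabs (a - b) = pyabs (i - j) then 1 else 0)
      = eqInd b a + eqInd (j - b) (i - a) + eqInd (j + b) (i + a) := by
  unfold eqInd pyabs
  split_ifs <;> omega

lemma foldl_ite2_add (p q : Int → Prop) [DecidablePred p] [DecidablePred q]
    (l : List Int) (a : Int) :
    l.foldl (fun h j => if p j then h + 1 else if q j then h + 1 else h) a
      = a + (l.map (fun j => if p j then (1 : Int) else if q j then 1 else 0)).sum := by
  induction l generalizing a with
  | nil => simp
  | cons x l ih =>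
    simp only [List.foldl_cons, List.map_cons, List.sum_cons, ih]
    split_ifs <;> ring

lemma heur_eq (arr : List Int) : pvHeur arr = pvCalc arr := by
  have r08 : PySem.List.pyRange 0 8 1 = [0, 1, 2, 3, 4, 5, 6, 7] := by decide
  have r0 : PySem.List.pyRange ((0:Int) + 1) 8 1 = [1, 2, 3, 4, 5, 6, 7] := by decide
  have r1 : PySem.List.pyRange ((1:Int) + 1) 8 1 = [2, 3, 4, 5, 6, 7] := by decide
  have r2 : PySem.List.pyRange ((2:Int) + 1) 8 1 = [3, 4, 5, 6, 7] := by decide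
  have r3 : PySem.List.pyRange ((3:Int) + 1) 8 1 = [4, 5, 6, 7] := by decide
  have r4 : PySem.List.pyRange ((4:Int) + 1) 8 1 = [5, 6, 7] := by decide
  have r5 : PySem.List.pyRange ((5:Int) + 1) 8 1 = [6, 7] := by decide
  have r6 : PySem.List.pyRange ((6:Int) + 1) 8 1 = [7] := by decide
  have r7 : PySem.List.pyRange ((7:Int) + 1) 8 1 = [] := by decide
  unfold pvHeur pvCalc
  rw [r08]
  simp only [List.foldl_cons, List.foldl_nil]
  simp only [foldl_ite2_add]
  rw [r0, r1, r2, r3, r4, r5, r6, r7]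
  simp only [List.map_cons, List.map_nil, List.sum_cons, List.sum_nil]
  simp only [pairlem 0 1 (by norm_num), pairlem 0 2 (by norm_num), pairlem 0 3 (by norm_num), pairlem 0 4 (by norm_num), pairlem 0 5 (by norm_num), pairlem 0 6 (by norm_num), pairlem 0 7 (by norm_num), pairlem 1 2 (by norm_num), pairlem 1 3 (by norm_num), pairlem 1 4 (by norm_num), pairlem 1 5 (by norm_num), pairlem 1 6 (by norm_num), pairlem 1 7 (by norm_num), pairlem 2 3 (by norm_num), pairlem 2 4 (by norm_num), pairlem 2 5 (by norm_num), pairlem 2 6 (by norm_num), pairlem 2 7 (by norm_num), pairlem 3 4 (by norm_num), pairlem 3 5 (by norm_num), pairlem 3 6 (by norm_num), pairlem 3 7 (by norm_num), pairlem 4 5 (by norm_num), pairlem 4 6 (by norm_num), pairlem 4 7 (by norm_num), pairlem 5 6 (by norm_num), pairlem 5 7 (by norm_num), pairlem 6 7 (by norm_num)]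
  simp only [pvPairs_eq]
  simp only [List.nil_append, List.cons_append]
  simp only [eqP, List.count_cons, List.count_nil, beq_iff_eq]
  push_cast
  simp only [eqInd]
  ring

-- ===== VERDICT (by name: the statement is the Claim_ definition above) =====
theorem get_nxt_spec : Claim_equal_get_nxt := by
  intro b _ _
  unfold Spec_get_nxt get_nxt get_nxt_alt
  simp only [heur_eq]
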